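-- pv_equiv track=rewrite | github.com/millanvzz/AOMVPROGBAS | programaspruebasignorar/ggg.py | ubicadorDeVocales
-- ===== SOURCE A (Python) =====
-- def ubicadorDeVocales(cadena):
--     vocales = "aeiouáéíóúAEIOUÁÉÍÓÚ"
--     ubicaciones_vocales = {}
--
--     for indice, caracter in enumerate(cadena):
--         if caracter in vocales:
--             if caracter not in ubicaciones_vocales:
--                 ubicaciones_vocales[caracter] = []
--             ubicaciones_vocales[caracter].append(indice)
--
--     return ubicaciones_vocales
-- ===== SOURCE B (Python) =====
-- def ubicadorDeVocales(cadena):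
--     vocales = "aeiouáéíóúAEIOUÁÉÍÓÚ"
--     vistas = []
--     for c in cadena:
--         if c in vocales and c not in vistas:
--             vistas.append(c)
--     return {v: [i for i, c in enumerate(cadena) if c == v] for v in vistas}
-- ===== Notes on version B (the rewrite author's own statement) =====
-- stated objective: alternative
-- what changed: Instead of one pass that lazily creates dict entries and appends to them, B first collects the distinct vowels in order of first appearance and then builds the dict by a per-vowel comprehension scanning the string for that vowel's positions.
import Mathlib
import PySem

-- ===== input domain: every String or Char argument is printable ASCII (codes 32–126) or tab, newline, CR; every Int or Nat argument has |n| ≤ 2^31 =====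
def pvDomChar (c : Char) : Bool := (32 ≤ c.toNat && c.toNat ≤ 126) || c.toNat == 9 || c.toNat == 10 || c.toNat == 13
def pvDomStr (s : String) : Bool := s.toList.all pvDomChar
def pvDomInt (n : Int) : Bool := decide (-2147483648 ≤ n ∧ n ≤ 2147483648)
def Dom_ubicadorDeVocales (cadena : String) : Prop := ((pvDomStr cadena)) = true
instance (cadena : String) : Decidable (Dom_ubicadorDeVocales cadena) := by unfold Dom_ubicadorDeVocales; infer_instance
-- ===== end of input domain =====

-- B replaces A's single accumulating pass (lazy dict-entry creation + append) by first
-- collecting the distinct vowels in first-appearance order and then, per vowel, scanning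
-- the string for its positions (objective: alternative decomposition, same result).

-- the vowel alphabet both Pythons share
def vocalesStr : List Char := "aeiouáéíóúAEIOUÁÉÍÓÚ".toList

-- ===== PORT A =====
def ubicadorDeVocales (cadena : String) : List (String × List Int) :=
  ((PySem.List.enumerate cadena.toList 0).foldl
    (fun d p =>
      if p.2 ∈ vocalesStr then
        -- if caracter not in ubicaciones_vocales: ubicaciones_vocales[caracter] = []
        let d1 := if d.contains (String.ofList [p.2]) = false then d.insert (String.ofList [p.2]) ([] : List Int) else d
        -- ubicaciones_vocales[caracter].append(indice)
        d1.insert (String.ofList [p.2]) (d1.getD (String.ofList [p.2]) [] ++ [p.1])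
      else d)
    PySem.Dict.empty).items

-- ===== PORT B =====
def ubicadorDeVocales_alt (cadena : String) : List (String × List Int) :=
  -- vistas: the distinct vowels in first-appearance order
  (cadena.toList.foldl (fun s c => if c ∈ vocalesStr ∧ c ∉ s then s ++ [c] else s) []).map
    -- dict comprehension; the keys (vistas) are distinct, so the items are exactly this list
    (fun v => (String.ofList [v],
      ((PySem.List.enumerate cadena.toList 0).filter (fun p => p.2 == v)).map (·.1)))

-- ===== PRECONDITION & SPEC =====
def Spec_ubicadorDeVocales (cadena : String) (out : List (String × List Int)) : Prop := out = ubicadorDeVocales_alt cadena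
instance (cadena : String) (out : List (String × List Int)) : Decidable (Spec_ubicadorDeVocales cadena out) := by unfold Spec_ubicadorDeVocales; infer_instance

-- ===== CLAIM (what is proved, stated in full; the proofs are below) =====
def Claim_equal_ubicadorDeVocales : Prop := ∀ (cadena : String), Dom_ubicadorDeVocales cadena → Spec_ubicadorDeVocales cadena (ubicadorDeVocales cadena)

-- ===== LEMMAS AND PROOFS =====

-- c ↦ "c" (a one-character string) is injective
theorem mkSingleton_inj : Function.Injective (fun c => String.ofList [c]) := by
  intro a b h
  simpa using String.ofList_inj.mp h

-- set() of an injectively mapped list is the mapped set()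
theorem ofList_map_inj {α β : Type} [DecidableEq α] [DecidableEq β]
    (f : α → β) (hf : Function.Injective f) (xs : List α) :
    PySem.Set.ofList (xs.map f) = (PySem.Set.ofList xs).map f := by
  induction xs using List.reverseRecOn with
  | nil => rfl
  | append_singleton xs x ih =>
    rw [List.map_append, List.map_singleton, PySem.Set.ofList_append_singleton,
      PySem.Set.ofList_append_singleton, ih, PySem.Set.add_eq_ite, PySem.Set.add_eq_ite]
    by_cases hx : x ∈ PySem.Set.ofList xs
    · simp [hx, List.mem_map_of_mem]
    · have hfx : f x ∉ (PySem.Set.ofList xs).map f := by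
        intro hmem
        obtain ⟨y, hy, hee⟩ := List.mem_map.mp hmem
        exact hx (hf hee ▸ hy)
      simp [hx, hfx]

-- A's loop body is exactly a `modify` (setdefault-to-[] then append)
theorem stepA_eq_modify :
    (fun (d : PySem.Dict String (List Int)) (p : Int × Char) =>
      if p.2 ∈ vocalesStr then
        let d1 := if d.contains (String.ofList [p.2]) = false then d.insert (String.ofList [p.2]) ([] : List Int) else d
        d1.insert (String.ofList [p.2]) (d1.getD (String.ofList [p.2]) [] ++ [p.1])
      else d)
    = (fun d p =>
      if p.2 ∈ vocalesStr then d.modify (String.ofList [p.2]) [] (· ++ [p.1]) else d) := by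
  funext d p
  by_cases hv : p.2 ∈ vocalesStr
  · simp only [hv, if_pos]
    by_cases hc : d.contains (String.ofList [p.2]) = false
    · simp only [if_pos hc]
      rw [show (d.modify (String.ofList [p.2]) [] (· ++ [p.1]))
            = d.insert (String.ofList [p.2]) (d.getD (String.ofList [p.2]) [] ++ [p.1]) from rfl,
        PySem.Dict.getD_insert_self, PySem.Dict.insert_insert_self]
      have hg : d.getD (String.ofList [p.2]) ([] : List Int) = [] := by
        simp [pysem, hc]
      rw [hg]
    · rw [if_neg hc]
      rfl
  · simp [hv]

-- a single-char-string equality test is the char equality test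
theorem beq_mkSingleton (a b : Char) : (String.ofList [a] == String.ofList [b]) = (a == b) := by
  by_cases h : a = b
  · simp [h]
  · simp [h, show String.ofList [a] ≠ String.ofList [b] from fun e => h (mkSingleton_inj e)]

theorem ubicadorDeVocales_spec_aux (cadena : String) :
    ubicadorDeVocales cadena = ubicadorDeVocales_alt cadena := by
  unfold ubicadorDeVocales ubicadorDeVocales_alt
  rw [stepA_eq_modify]
  set cs := cadena.toList with hcs
  set E := PySem.List.enumerate cs 0 with hE
  -- push A's vowel test into a filter, then into a map of (key, index) pairs
  have hfold :
      E.foldl (fun d p => if p.2 ∈ vocalesStr then d.modify (String.ofList [p.2]) [] (· ++ [p.1]) else d)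
        PySem.Dict.empty
      = ((E.filter (fun p => decide (p.2 ∈ vocalesStr))).map (fun p => (String.ofList [p.2], p.1))).foldl
          (fun d q => d.modify q.1 [] (· ++ [q.2])) PySem.Dict.empty := by
    rw [List.foldl_map, List.foldl_filter]
    congr 1
    funext d p
    by_cases h : p.2 ∈ vocalesStr <;> simp [h]
  rw [hfold]
  set M := (E.filter (fun p => decide (p.2 ∈ vocalesStr))).map (fun p => (String.ofList [p.2], p.1)) with hM
  set D := M.foldl (fun d q => d.modify q.1 [] (· ++ [q.2])) PySem.Dict.empty with hD
  -- keys of D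
  have hnodup : D.keys.Nodup := by
    rw [hD]
    exact PySem.Dict.nodup_keys_foldl_modify_key _ _ _ _ _ PySem.Dict.nodup_keys_empty
  have hMfst : M.map (·.1) = (cs.filter (fun c => decide (c ∈ vocalesStr))).map (fun c => String.ofList [c]) := by
    rw [hM, List.map_map]
    show (E.filter ((fun c => decide (c ∈ vocalesStr)) ∘ (fun p : Int × Char => p.2))).map
        ((fun c => String.ofList [c]) ∘ (fun p : Int × Char => p.2)) = _
    rw [← List.map_map, ← List.filter_map, PySem.List.map_snd_enumerate]
  have hkeys : D.keys
      = (PySem.Set.ofList (cs.filter (fun c => decide (c ∈ vocalesStr)))).map (fun c => String.ofList [c]) := by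
    rw [hD, PySem.Dict.keys_foldl_modify_key]
    simp only [PySem.Dict.keys_empty, PySem.Set.update_nil_left]
    rw [show List.map Prod.fst M = M.map (·.1) from rfl, hMfst, ofList_map_inj _ mkSingleton_inj]
  -- B's first loop collects exactly set(filter(vowel, cs)) in order
  have hvistas :
      cs.foldl (fun s c => if c ∈ vocalesStr ∧ c ∉ s then s ++ [c] else s) []
        = PySem.Set.ofList (cs.filter (fun c => decide (c ∈ vocalesStr))) := by
    rw [PySem.Set.ofList_eq_foldl, List.foldl_filter]
    congr 1
    funext s c
    by_cases hv : c ∈ vocalesStr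
    · rw [PySem.Set.add_eq_ite]
      by_cases hs : c ∈ s <;> simp [hv, hs]
    · simp [hv]
  -- per-key values: the positions of v
  have hval : ∀ v ∈ cs.filter (fun c => decide (c ∈ vocalesStr)),
      D.getD (String.ofList [v]) [] = ((E.filter (fun p => p.2 == v)).map (·.1)) := by
    intro v hv
    have hvv : v ∈ vocalesStr := by simpa using (List.mem_filter.mp hv).2
    rw [hD, PySem.Dict.getD_foldl_modify_append, PySem.Dict.getD_empty, List.nil_append, hM,
      List.filter_map, List.map_map]
    have h1 : ((fun p : String × Int => p.1 == String.ofList [v]) ∘ (fun p : Int × Char => (String.ofList [p.2], p.1)))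
        = fun p : Int × Char => p.2 == v := by
      funext p
      exact beq_mkSingleton p.2 v
    rw [h1, List.filter_filter]
    have h2 : (fun p : Int × Char => p.2 == v && decide (p.2 ∈ vocalesStr)) = fun p : Int × Char => p.2 == v := by
      funext p
      by_cases h : p.2 = v <;> simp [h, hvv]
    rw [h2]
    rfl
  -- assemble
  rw [PySem.Dict.items_eq_map_keys D hnodup [], hkeys, hvistas, List.map_map]
  refine List.map_congr_left ?_
  intro v hvmem
  have hv : v ∈ cs.filter (fun c => decide (c ∈ vocalesStr)) := (PySem.Set.mem_ofList _ _).mp hvmem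
  simp only [Function.comp]
  rw [hval v hv]

-- ===== VERDICT (by name: the statement is the Claim_ definition above) =====
theorem ubicadorDeVocales_spec : Claim_equal_ubicadorDeVocales := by
  intro cadena _
  unfold Spec_ubicadorDeVocales
  exact ubicadorDeVocales_spec_aux cadena
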